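-- pv_equiv track=rewrite | github.com/kaumnen/codewars | [7 kyu] Halving Sum.py | halving_sum
-- ===== SOURCE A (Python) =====
-- def halving_sum(n):
--     result = 0
--     i = 1
--     while n > 0:
--         result += n
--         n = n // 2
--         i *= 2
--
--     return result
-- ===== SOURCE B (Python) =====
-- def halving_sum(n):
--     return 0 if n <= 0 else n + halving_sum(n // 2)
-- ===== Notes on version B (the rewrite author's own statement) =====
-- stated objective: simpler
-- what changed: Replaced the while-loop with its running total (and an unused doubling counter i) by a direct recursion n + halving_sum(n // 2) with base case n <= 0.
import Mathlib
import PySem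

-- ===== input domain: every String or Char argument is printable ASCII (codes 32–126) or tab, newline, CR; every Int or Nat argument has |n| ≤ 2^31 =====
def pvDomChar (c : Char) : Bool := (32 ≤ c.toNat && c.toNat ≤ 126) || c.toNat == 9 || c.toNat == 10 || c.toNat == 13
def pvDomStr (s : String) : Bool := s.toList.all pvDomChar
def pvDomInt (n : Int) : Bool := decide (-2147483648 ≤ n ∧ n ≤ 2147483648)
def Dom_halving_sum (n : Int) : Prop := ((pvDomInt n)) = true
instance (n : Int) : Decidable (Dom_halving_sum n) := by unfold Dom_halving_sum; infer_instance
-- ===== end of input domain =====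

-- B replaces A's while-loop (running total and an unused counter i) by a direct recursion; same cost.

-- ===== PORT A =====
-- the while-loop of A, carried as structural recursion on the shrinking n with the loop state (result, i)
def halving_sum_loop (n result i : Int) : Int :=
  if h : n > 0 then
    halving_sum_loop (PySem.Int.floordiv n 2) (result + n) (i * 2)
  else
    result
termination_by n.toNat
decreasing_by
  have h2 : PySem.Int.floordiv n 2 = n / 2 := PySem.Int.floordiv_eq_ediv_of_pos (by omega)
  rw [h2]; omega

def halving_sum (n : Int) : Int := halving_sum_loop n 0 1

-- ===== PORT B =====
def halving_sum_alt (n : Int) : Int :=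
  if _h : n ≤ 0 then 0 else n + halving_sum_alt (PySem.Int.floordiv n 2)
termination_by n.toNat
decreasing_by
  have h2 : PySem.Int.floordiv n 2 = n / 2 := PySem.Int.floordiv_eq_ediv_of_pos (by omega)
  rw [h2]; omega

-- ===== PRECONDITION & SPEC =====
def Spec_halving_sum (n : Int) (out : Int) : Prop := out = halving_sum_alt n
instance (n : Int) (out : Int) : Decidable (Spec_halving_sum n out) := by unfold Spec_halving_sum; infer_instance

-- ===== CLAIM (what is proved, stated in full; the proofs are below) =====
def Claim_equal_halving_sum : Prop := ∀ (n : Int), Dom_halving_sum n → Spec_halving_sum n (halving_sum n)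

-- ===== LEMMAS AND PROOFS =====
-- loop invariant: the loop adds halving_sum_alt n onto the accumulator (i is dead state)
theorem halving_sum_loop_eq (n result i : Int) :
    halving_sum_loop n result i = result + halving_sum_alt n := by
  by_cases h : n > 0
  · rw [halving_sum_loop, halving_sum_alt]
    rw [dif_pos h, dif_neg (by omega), halving_sum_loop_eq]
    ring
  · rw [halving_sum_loop, halving_sum_alt]
    rw [dif_neg h, dif_pos (by omega)]
    ring
termination_by n.toNat
decreasing_by
  have h2 : PySem.Int.floordiv n 2 = n / 2 := PySem.Int.floordiv_eq_ediv_of_pos (by omega)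
  rw [h2]; omega

-- ===== VERDICT (by name: the statement is the Claim_ definition above) =====
theorem halving_sum_spec : Claim_equal_halving_sum := by
  intro n _
  show halving_sum n = halving_sum_alt n
  rw [halving_sum, halving_sum_loop_eq]
  ring
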